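-- pv_equiv track=rewrite | github.com/JVitorFlow/Dash | django-dashboard-kit/apps/ligobots/services.py | verificar_abandono_cognitivo
-- ===== SOURCE A (Python) =====
-- def verificar_abandono_cognitivo(ivr_events):
--     log_abandono = False
--     captura_audio = False
--
--     for event in ivr_events:
--         step_name = event.get('step_name', '')
--
--         if step_name == "LogAbandonoCognitivo":
--             log_abandono = True
--
--         if step_name == "CapturaAudio":
--             captura_audio = True
--
--     # A chamada é um abandono cognitivo se tem LogAbandonoCognitivo e não tem CapturaAudio
--     if log_abandono and not captura_audio:
--         return True
--
--     return False
-- ===== SOURCE B (Python) =====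
-- def verificar_abandono_cognitivo(ivr_events):
--     def has_step(name):
--         return any(event.get('step_name', '') == name for event in ivr_events)
--     return has_step('LogAbandonoCognitivo') and not has_step('CapturaAudio')
-- ===== Notes on version B (the rewrite author's own statement) =====
-- stated objective: idiomatic
-- what changed: Replaces A's single pass that maintains two boolean flags with two independent short-circuiting any()-passes through a has_step predicate helper, returning the conjunction directly.
import Mathlib
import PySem

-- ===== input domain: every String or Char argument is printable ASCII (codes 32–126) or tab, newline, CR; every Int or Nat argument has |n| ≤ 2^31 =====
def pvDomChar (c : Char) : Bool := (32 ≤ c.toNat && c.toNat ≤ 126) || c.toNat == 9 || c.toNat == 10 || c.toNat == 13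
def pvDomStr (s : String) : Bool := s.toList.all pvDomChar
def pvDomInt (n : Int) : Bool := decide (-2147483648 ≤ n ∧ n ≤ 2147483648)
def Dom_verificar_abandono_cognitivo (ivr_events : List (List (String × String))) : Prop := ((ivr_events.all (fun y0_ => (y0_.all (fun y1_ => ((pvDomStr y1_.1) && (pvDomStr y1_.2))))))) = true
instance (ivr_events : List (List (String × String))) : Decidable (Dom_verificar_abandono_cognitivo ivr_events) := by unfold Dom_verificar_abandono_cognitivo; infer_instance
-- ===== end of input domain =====

-- B replaces A's one-pass two-flag loop with two independent short-circuiting any()-passes via a has_step predicate helper (objective: idiomatic); same return value on every input.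


-- ===== PORT A =====
-- event.get('step_name', '') for a dict as an association list: first match, exact.
def pvGetStep (e : List (String × String)) : String :=
  match e.find? (fun p => p.1 == "step_name") with
  | some p => p.2
  | none => ""

-- Port of A: foldl maintaining the two flags (log_abandono, captura_audio).
def verificar_abandono_cognitivo (ivr_events : List (List (String × String))) : Bool :=
  let st := ivr_events.foldl (fun (acc : Bool × Bool) event =>
    let step_name := pvGetStep event
    let acc := if step_name == "LogAbandonoCognitivo" then (true, acc.2) else acc
    if step_name == "CapturaAudio" then (acc.1, true) else acc) (false, false)
  if st.1 && !st.2 then true else false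

-- ===== PORT B =====
-- has_step(name) = any(event.get('step_name','') == name for event in ivr_events); List.any short-circuits like any().
def pvHasStep (ivr_events : List (List (String × String))) (name : String) : Bool :=
  ivr_events.any (fun event => pvGetStep event == name)

-- Port of B: two independent any()-passes, conjoined.
def verificar_abandono_cognitivo_alt (ivr_events : List (List (String × String))) : Bool :=
  pvHasStep ivr_events "LogAbandonoCognitivo" && !(pvHasStep ivr_events "CapturaAudio")

-- ===== PRECONDITION & SPEC =====
def Spec_verificar_abandono_cognitivo (ivr_events : List (List (String × String))) (out : Bool) : Prop := out = verificar_abandono_cognitivo_alt ivr_events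
instance (ivr_events : List (List (String × String))) (out : Bool) : Decidable (Spec_verificar_abandono_cognitivo ivr_events out) := by unfold Spec_verificar_abandono_cognitivo; infer_instance

-- ===== CLAIM (what is proved, stated in full; the proofs are below) =====
def Claim_equal_verificar_abandono_cognitivo : Prop := ∀ (ivr_events : List (List (String × String))), Dom_verificar_abandono_cognitivo ivr_events → Spec_verificar_abandono_cognitivo ivr_events (verificar_abandono_cognitivo ivr_events)

-- ===== LEMMAS AND PROOFS =====
-- The foldl's flag pair is (p.1 || any event matches Log, p.2 || any event matches Cap).
theorem vac_foldl_inv (xs : List (List (String × String))) (p : Bool × Bool) :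
    xs.foldl (fun (acc : Bool × Bool) event =>
      let step_name := pvGetStep event
      let acc := if step_name == "LogAbandonoCognitivo" then (true, acc.2) else acc
      if step_name == "CapturaAudio" then (acc.1, true) else acc) p
    = (p.1 || xs.any (fun e => pvGetStep e == "LogAbandonoCognitivo"),
       p.2 || xs.any (fun e => pvGetStep e == "CapturaAudio")) := by
  induction xs generalizing p with
  | nil => simp
  | cons e t ih =>
    rw [List.foldl_cons, ih]
    simp only [List.any_cons]
    by_cases h1 : (pvGetStep e == "LogAbandonoCognitivo") = true <;>
    by_cases h2 : (pvGetStep e == "CapturaAudio") = true <;>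
      simp [h1, h2]

-- ===== VERDICT (by name: the statement is the Claim_ definition above) =====
theorem verificar_abandono_cognitivo_spec : Claim_equal_verificar_abandono_cognitivo := by
  intro iv _
  unfold Spec_verificar_abandono_cognitivo verificar_abandono_cognitivo verificar_abandono_cognitivo_alt pvHasStep
  simp only [vac_foldl_inv, Bool.false_or]
  split
  · next h => exact h.symm
  · next h => exact (Bool.eq_false_iff.mpr h).symm
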